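-- pv_equiv track=rewrite | github.com/thakur-nishant/Battleship | minIntegertMultipleOfN.py | solution
-- ===== SOURCE A (Python) =====
-- def mult_num(num):
--     result = 1
--     for i in num:
--         result *= int(i)
--
--     return result
--
-- def min_num_combination(num):
--     l = sorted(list(str(num)))
--     result = ""
--     for i in l:
--         result += i
--     return int(result)
--
-- def solution(n):
--     result = int(str(n) + '1')
--
--     for i in range(1,n+1):
--         if n%i == 0:
--             num = str(i)
--             num += str(n//i)
--
--             if n == mult_num(num):
--                 res = min_num_combination(num)
--                 result = min(result, res)
--
--     return  result
-- ===== SOURCE B (Python) =====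
-- def solution(n):
--     best = int(str(n) + '1')
--     i = 1
--     while i * i <= n:
--         if n % i == 0:
--             j = n // i
--             digits = str(i) + str(j)
--             p = 1
--             for d in digits:
--                 p *= int(d)
--             if p == n:
--                 best = min(best, int(''.join(sorted(digits))))
--         i += 1
--     return best
-- ===== Notes on version B (the rewrite author's own statement) =====
-- stated objective: faster
-- what changed: B enumerates divisors only up to sqrt(n) in a while loop, handling each factor pair once (the candidate digit string is symmetric in the pair), instead of A's scan over every candidate divisor up to n.
import Mathlib
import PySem

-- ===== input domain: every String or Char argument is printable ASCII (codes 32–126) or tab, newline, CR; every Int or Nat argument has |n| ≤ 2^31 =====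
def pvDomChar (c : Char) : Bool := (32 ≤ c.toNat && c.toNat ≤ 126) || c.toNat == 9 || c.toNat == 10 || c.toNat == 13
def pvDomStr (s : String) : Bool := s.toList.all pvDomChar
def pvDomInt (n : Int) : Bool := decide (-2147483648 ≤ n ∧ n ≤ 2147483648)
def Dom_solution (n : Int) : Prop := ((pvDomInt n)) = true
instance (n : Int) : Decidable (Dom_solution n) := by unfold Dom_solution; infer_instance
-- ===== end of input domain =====

-- B replaces A's scan over every candidate divisor up to n by a while loop over the
-- divisors i with i*i ≤ n, handling each factor pair once (objective: faster).

-- ===== PORT A =====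
-- Strings are represented as List Char (PySem.Chars convention).
-- mult_num: int(c) on a single digit char; ofChars? always succeeds on the digit
-- strings this is applied to, so .getD 0 is never taken.
def multNum (num : List Char) : Int :=
  num.foldl (fun result i => result * (PySem.Int.ofChars? [i]).getD 0) 1

-- min_num_combination: its argument is always a string here, so str(num) is num itself.
def minNumCombination (num : List Char) : Int :=
  let l := PySem.List.sorted num (fun x => x) false
  let result := l.foldl (fun result i => result ++ [i]) ([] : List Char)
  (PySem.Int.ofChars? result).getD 0

def solution (n : Int) : Int :=
  let result := (PySem.Int.ofChars? (PySem.Int.toChars n ++ ['1'])).getD 0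
  (PySem.List.pyRange 1 (n + 1) 1).foldl
    (fun result i =>
      if PySem.Int.mod n i = 0 then
        let num := PySem.Int.toChars i ++ PySem.Int.toChars (PySem.Int.floordiv n i)
        if n = multNum num then min result (minNumCombination num) else result
      else result)
    result

-- ===== PORT B =====
-- needed by the while loop's termination: i*i ≤ n forces i ≤ n
theorem pv_int_le_mul_self (i : Int) : i ≤ i * i := by
  rcases Int.lt_or_le 0 i with h | h
  · nlinarith
  · nlinarith [mul_self_nonneg i]

def solutionAltLoop (n i best : Int) : Int :=
  if h : i * i ≤ n then
    let best' :=
      if PySem.Int.mod n i = 0 then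
        let j := PySem.Int.floordiv n i
        let digits := PySem.Int.toChars i ++ PySem.Int.toChars j
        let p := digits.foldl (fun p d => p * (PySem.Int.ofChars? [d]).getD 0) 1
        if p = n then
          min best ((PySem.Int.ofChars? (PySem.List.sorted digits (fun x => x) false)).getD 0)
        else best
      else best
    solutionAltLoop n (i + 1) best'
  else best
termination_by (n + 1 - i).toNat
decreasing_by
  have hi : i ≤ n := le_trans (pv_int_le_mul_self i) h
  omega

def solution_alt (n : Int) : Int :=
  solutionAltLoop n 1 ((PySem.Int.ofChars? (PySem.Int.toChars n ++ ['1'])).getD 0)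

-- ===== PRECONDITION & SPEC =====
def Spec_solution (n : Int) (out : Int) : Prop := out = solution_alt n
instance (n : Int) (out : Int) : Decidable (Spec_solution n out) := by unfold Spec_solution; infer_instance

-- ===== CLAIM (what is proved, stated in full; the proofs are below) =====
def Claim_equal_solution : Prop := ∀ (n : Int), Dom_solution n → Spec_solution n (solution n)

-- ===== LEMMAS AND PROOFS =====

-- the candidate a divisor i contributes in A's loop body (none if it contributes nothing)
def candA (n i : Int) : Option Int :=
  if PySem.Int.mod n i = 0 then
    if n = multNum (PySem.Int.toChars i ++ PySem.Int.toChars (PySem.Int.floordiv n i)) then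
      some (minNumCombination (PySem.Int.toChars i ++ PySem.Int.toChars (PySem.Int.floordiv n i)))
    else none
  else none

-- the list of loop indices B's while loop visits
def whileList (n i : Int) : List Int :=
  if h : i * i ≤ n then i :: whileList n (i + 1) else []
termination_by (n + 1 - i).toNat
decreasing_by
  have hi : i ≤ n := le_trans (pv_int_le_mul_self i) h
  omega

theorem foldl_min_le_init (l : List Int) (a : Int) : l.foldl min a ≤ a := by
  induction l generalizing a with
  | nil => simp
  | cons x t ih => exact le_trans (ih (min a x)) (min_le_left a x)

theorem foldl_min_le_mem (l : List Int) (a x : Int) (hx : x ∈ l) : l.foldl min a ≤ x := by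
  induction l generalizing a with
  | nil => simp at hx
  | cons y t ih =>
    rcases List.mem_cons.mp hx with rfl | hx
    · exact le_trans (foldl_min_le_init t (min a x)) (min_le_right a x)
    · exact ih (min a y) hx

theorem le_foldl_min (l : List Int) (a b : Int) (ha : b ≤ a) (hl : ∀ x ∈ l, b ≤ x) :
    b ≤ l.foldl min a := by
  induction l generalizing a with
  | nil => simpa using ha
  | cons y t ih =>
    exact ih (min a y) (le_min ha (hl y List.mem_cons_self)) (fun x hx => hl x (List.mem_cons_of_mem y hx))

theorem foldl_min_eq_of_mem_iff (l l' : List Int) (a : Int)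
    (h : ∀ x, x ∈ l ↔ x ∈ l') : l.foldl min a = l'.foldl min a := by
  apply le_antisymm
  · exact le_foldl_min l' a _ (foldl_min_le_init l a)
      (fun x hx => foldl_min_le_mem l a x ((h x).mpr hx))
  · exact le_foldl_min l a _ (foldl_min_le_init l' a)
      (fun x hx => foldl_min_le_mem l' a x ((h x).mp hx))


theorem multNum_def (num : List Char) :
    num.foldl (fun p d => p * (PySem.Int.ofChars? [d]).getD 0) 1 = multNum num := rfl

theorem foldl_append_singleton (l : List Char) : ∀ acc : List Char,
    l.foldl (fun r c => r ++ [c]) acc = acc ++ l := by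
  induction l with
  | nil => intro acc; simp
  | cons x t ih => intro acc; simp [ih, List.append_assoc]

theorem minNumComb_eq (num : List Char) :
    minNumCombination num
      = (PySem.Int.ofChars? (PySem.List.sorted num (fun x => x) false)).getD 0 := by
  unfold minNumCombination
  simp only [foldl_append_singleton, List.nil_append]

theorem foldl_mul_shift (l : List Char) : ∀ c : Int,
    l.foldl (fun r i => r * (PySem.Int.ofChars? [i]).getD 0) c
      = c * l.foldl (fun r i => r * (PySem.Int.ofChars? [i]).getD 0) 1 := by
  induction l with
  | nil => intro c; simp
  | cons x t ih =>
    intro c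
    simp only [List.foldl_cons]
    rw [ih (c * (PySem.Int.ofChars? [x]).getD 0), ih (1 * (PySem.Int.ofChars? [x]).getD 0)]
    ring

theorem multNum_append (a b : List Char) : multNum (a ++ b) = multNum a * multNum b := by
  unfold multNum
  rw [List.foldl_append, foldl_mul_shift]

theorem minNumComb_perm (a b : List Char) (h : a.Perm b) :
    minNumCombination a = minNumCombination b := by
  unfold minNumCombination
  rw [PySem.List.sorted_eq_sorted_of_perm a b (fun x => x) (fun _ _ hxy => hxy) h]

theorem stepA_eq (n r i : Int) :
    (if PySem.Int.mod n i = 0 then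
        let num := PySem.Int.toChars i ++ PySem.Int.toChars (PySem.Int.floordiv n i)
        if n = multNum num then min r (minNumCombination num) else r
      else r)
    = (match candA n i with | some c => min r c | none => r) := by
  unfold candA
  by_cases h1 : PySem.Int.mod n i = 0
  · simp only [h1, if_true]
    by_cases h2 : n = multNum (PySem.Int.toChars i ++ PySem.Int.toChars (PySem.Int.floordiv n i))
    · rw [if_pos h2, if_pos h2]
    · rw [if_neg h2, if_neg h2]
  · simp [h1]

theorem foldlA_eq (n : Int) (l : List Int) (r : Int) :
    l.foldl (fun result i =>
      if PySem.Int.mod n i = 0 then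
        let num := PySem.Int.toChars i ++ PySem.Int.toChars (PySem.Int.floordiv n i)
        if n = multNum num then min result (minNumCombination num) else result
      else result) r
    = (l.filterMap (candA n)).foldl min r := by
  induction l generalizing r with
  | nil => rfl
  | cons x t ih =>
    rw [List.foldl_cons, List.filterMap_cons, stepA_eq]
    cases hc : candA n x <;> simp only [List.foldl_cons] <;> rw [ih]

theorem stepB_eq (n best i : Int) :
    (if PySem.Int.mod n i = 0 then
        let j := PySem.Int.floordiv n i
        let digits := PySem.Int.toChars i ++ PySem.Int.toChars j
        let p := digits.foldl (fun p d => p * (PySem.Int.ofChars? [d]).getD 0) 1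
        if p = n then
          min best ((PySem.Int.ofChars? (PySem.List.sorted digits (fun x => x) false)).getD 0)
        else best
      else best)
    = (match candA n i with | some c => min best c | none => best) := by
  unfold candA
  by_cases h1 : PySem.Int.mod n i = 0
  · simp only [h1, if_true, multNum_def]
    rw [← minNumComb_eq]
    by_cases h2 : n = multNum (PySem.Int.toChars i ++ PySem.Int.toChars (PySem.Int.floordiv n i))
    · rw [if_pos h2.symm, if_pos h2]
    · rw [if_neg (fun hh => h2 hh.symm), if_neg h2]
  · simp [h1]

theorem altLoop_eq (n : Int) : ∀ (k : Nat) (i best : Int), (n + 1 - i).toNat ≤ k →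
    solutionAltLoop n i best = ((whileList n i).filterMap (candA n)).foldl min best := by
  intro k
  induction k with
  | zero =>
    intro i best hk
    rw [solutionAltLoop, whileList]
    have hni : ¬ i * i ≤ n := by
      intro h
      have := pv_int_le_mul_self i
      omega
    simp [hni]
  | succ k ih =>
    intro i best hk
    rw [solutionAltLoop, whileList]
    by_cases h : i * i ≤ n
    · have hi : i ≤ n := le_trans (pv_int_le_mul_self i) h
      simp only [h, dif_pos]
      rw [ih (i + 1) _ (by omega), List.filterMap_cons, stepB_eq]
      cases hc : candA n i <;> simp only [List.foldl_cons]
    · simp [h]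

theorem mem_whileList (n : Int) : ∀ (k : Nat) (i j : Int), (n + 1 - i).toNat ≤ k → 1 ≤ i →
    (j ∈ whileList n i ↔ i ≤ j ∧ j * j ≤ n) := by
  intro k
  induction k with
  | zero =>
    intro i j hk hi
    rw [whileList]
    have hni : ¬ i * i ≤ n := by
      intro h
      have := pv_int_le_mul_self i
      omega
    rw [dif_neg hni]
    simp only [List.not_mem_nil, false_iff, not_and]
    intro hij hjj
    have := pv_int_le_mul_self j
    omega
  | succ k ih =>
    intro i j hk hi
    rw [whileList]
    by_cases h : i * i ≤ n
    · have hii : i ≤ n := le_trans (pv_int_le_mul_self i) h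
      simp only [h, dif_pos, List.mem_cons]
      rw [ih (i + 1) j (by omega) (by omega)]
      constructor
      · rintro (rfl | ⟨h1, h2⟩)
        · exact ⟨le_refl _, h⟩
        · exact ⟨by omega, h2⟩
      · rintro ⟨h1, h2⟩
        rcases eq_or_lt_of_le h1 with rfl | hlt
        · exact Or.inl rfl
        · exact Or.inr ⟨by omega, h2⟩
    · rw [dif_neg h]
      simp only [List.not_mem_nil, false_iff, not_and]
      intro hij hjj
      have hjle := pv_int_le_mul_self j
      have : i * i ≤ j * j := mul_le_mul hij hij (by omega) (by omega)
      omega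

theorem mem_whileList_one (n j : Int) : j ∈ whileList n 1 ↔ 1 ≤ j ∧ j * j ≤ n :=
  mem_whileList n (n.toNat) 1 j (by omega) le_rfl

theorem fdiv_fact (n i : Int) (hi : 1 ≤ i) (hd : PySem.Int.mod n i = 0) :
    n = i * PySem.Int.floordiv n i := by
  obtain ⟨k, hk⟩ := (PySem.Int.mod_eq_zero_iff_dvd n i).mp hd
  have hq : PySem.Int.floordiv n i = k := by
    rw [PySem.Int.floordiv_eq_iff_of_pos (by omega)]
    constructor <;> nlinarith
  rw [hq]
  exact hk

theorem candA_symm (n i : Int) (hi : 1 ≤ i) (hin : i ≤ n) (hd : PySem.Int.mod n i = 0) :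
    candA n (PySem.Int.floordiv n i) = candA n i := by
  have hn : 1 ≤ n := le_trans hi hin
  have hij : n = i * PySem.Int.floordiv n i := fdiv_fact n i hi hd
  set j := PySem.Int.floordiv n i with hjdef
  have hj1 : 1 ≤ j := by nlinarith
  have hmodj : PySem.Int.mod n j = 0 :=
    (PySem.Int.mod_eq_zero_iff_dvd n j).mpr ⟨i, by linarith [hij, mul_comm i j]⟩
  have hdivj : PySem.Int.floordiv n j = i := by
    rw [PySem.Int.floordiv_eq_iff_of_pos (by omega)]
    constructor <;> nlinarith
  unfold candA
  rw [hdivj]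
  have hmul : multNum (PySem.Int.toChars j ++ PySem.Int.toChars i)
      = multNum (PySem.Int.toChars i ++ PySem.Int.toChars j) := by
    rw [multNum_append, multNum_append, mul_comm]
  have hmin : minNumCombination (PySem.Int.toChars j ++ PySem.Int.toChars i)
      = minNumCombination (PySem.Int.toChars i ++ PySem.Int.toChars j) :=
    minNumComb_perm _ _ List.perm_append_comm
  simp only [hd, hmodj, if_true, hmul, hmin]
  rw [← hjdef]

theorem cand_mem_iff (n c : Int) :
    (c ∈ (PySem.List.pyRange 1 (n + 1) 1).filterMap (candA n))
      ↔ c ∈ (whileList n 1).filterMap (candA n) := by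
  simp only [List.mem_filterMap, PySem.List.mem_pyRange_one, mem_whileList_one]
  constructor
  · rintro ⟨i, ⟨h1, h2⟩, hc⟩
    by_cases hsq : i * i ≤ n
    · exact ⟨i, ⟨h1, hsq⟩, hc⟩
    · have hd : PySem.Int.mod n i = 0 := by
        by_contra hmd
        unfold candA at hc
        rw [if_neg hmd] at hc
        simp at hc
      have hij : n = i * PySem.Int.floordiv n i := fdiv_fact n i h1 hd
      set j := PySem.Int.floordiv n i with hjdef
      have hj1 : 1 ≤ j := by nlinarith
      have hji : j < i := by nlinarith
      have hjj : j * j ≤ n := by nlinarith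
      refine ⟨j, ⟨hj1, hjj⟩, ?_⟩
      rw [candA_symm n i h1 (by omega) hd]
      exact hc
  · rintro ⟨i, ⟨h1, h2⟩, hc⟩
    have := pv_int_le_mul_self i
    exact ⟨i, ⟨h1, by omega⟩, hc⟩

theorem solutionA_eq (n : Int) :
    solution n = ((PySem.List.pyRange 1 (n + 1) 1).filterMap (candA n)).foldl min
      ((PySem.Int.ofChars? (PySem.Int.toChars n ++ ['1'])).getD 0) := by
  unfold solution
  exact foldlA_eq n _ _

theorem solutionB_eq (n : Int) :
    solution_alt n = ((whileList n 1).filterMap (candA n)).foldl min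
      ((PySem.Int.ofChars? (PySem.Int.toChars n ++ ['1'])).getD 0) := by
  unfold solution_alt
  exact altLoop_eq n n.toNat 1 _ (by omega)

-- ===== VERDICT (by name: the statement is the Claim_ definition above) =====
theorem solution_spec : Claim_equal_solution := by
  unfold Claim_equal_solution
  intro n _
  unfold Spec_solution
  rw [solutionA_eq, solutionB_eq]
  exact foldl_min_eq_of_mem_iff _ _ _ (cand_mem_iff n)
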